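-- pv_equiv track=rewrite | github.com/g2gonee2025-cloud/emailops | backend/src/cortex/ingestion/conversation_parser.py | _split_recipients
-- ===== SOURCE A (Python) =====
-- from typing import Any, Dict, List, Tuple
--
-- def _split_recipients(value: str) -> List[str]:
--     """
--     Split recipient string by comma or semicolon, respecting quoted strings.
--     E.g. '"Doe, John" <j@d.com>, Jane' -> ['"Doe, John" <j@d.com>', 'Jane']
--     """
--     # Regex explanation:
--     # 1. Quoted string: "..." (non-capturing group for content)
--     # 2. OR Non-separator chars: [^;,]+
--     # Pattern finds all chunks that are either a quoted string or non-delimiters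
--     # This is complex to do purely with split, so we verify a simple state machine approach
--     # or a robust regex findall.
--
--     # Robust regex approach:
--     # Match either:
--     # - A quoted string: "  (?:[^"\\]|\\.)*  "
--     # - A non-special char sequence: [^;,"]+
--     # Then join them until we hit a delimiter? No.
--
--     # Simpler: Use a state-machine parser for robustness
--     if not value:
--         return []
--
--     parts = []
--     current = []
--     in_quote = False
--
--     for char in value:
--         if char == '"':
--             in_quote = not in_quote
--             current.append(char)
--         elif char in (",", ";") and not in_quote:
--             # Delimiter found outside quote
--             parts.append("".join(current).strip())
--             current = []
--         else:
--             current.append(char)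
--
--     if current:
--         parts.append("".join(current).strip())
--
--     return [p for p in parts if p]
-- ===== SOURCE B (Python) =====
-- from typing import List
--
--
-- def _split_recipients(value: str) -> List[str]:
--     # Segment-level algorithm: cut on '"' first; odd segments are quoted text
--     # (kept verbatim), even segments are split on the delimiters.
--     parts: List[str] = []
--     current = ""
--     for i, seg in enumerate(value.split('"')):
--         if i > 0:
--             current += '"'
--         if i % 2 == 1:
--             current += seg
--         else:
--             pieces = seg.replace(";", ",").split(",")
--             current += pieces[0]
--             for p in pieces[1:]:
--                 parts.append(current.strip())
--                 current = p
--     if current: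
--         parts.append(current.strip())
--     return [p for p in parts if p]
-- ===== Notes on version B (the rewrite author's own statement) =====
-- stated objective: alternative
-- what changed: Replaces A's character-by-character state machine with an in_quote flag by a segment-level algorithm: cut the string once on the quote character, keep odd (quoted) segments verbatim, and split only the even segments on the delimiters via replace/split.
import Mathlib
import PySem

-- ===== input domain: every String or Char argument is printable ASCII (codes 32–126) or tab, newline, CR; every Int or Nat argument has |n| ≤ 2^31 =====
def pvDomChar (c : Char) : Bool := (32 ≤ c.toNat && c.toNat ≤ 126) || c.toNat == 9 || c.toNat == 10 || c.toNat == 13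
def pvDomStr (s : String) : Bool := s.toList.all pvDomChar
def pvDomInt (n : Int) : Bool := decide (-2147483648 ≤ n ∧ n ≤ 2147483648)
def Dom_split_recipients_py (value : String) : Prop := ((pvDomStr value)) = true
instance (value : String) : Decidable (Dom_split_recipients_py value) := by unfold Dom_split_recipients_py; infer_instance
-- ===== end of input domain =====

-- B replaces A's character-level quote state machine by a segment-level algorithm:
-- cut on '"' first, keep odd segments verbatim, split even segments on the delimiters
-- (objective: alternative decomposition; a timing run measured B faster at the largest size).
-- Both ports keep the accumulated parts as List Char and build the Strings once at the
-- end (Python's "".join(...).strip() at append time); the final filter `p != ""` is the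
-- filter `p ≠ []` before String.ofList.

-- ===== PORT A =====
-- the loop body of A: state = (parts, current, in_quote)
def pvStepA (st : List (List Char) × List Char × Bool) (c : Char) :
    List (List Char) × List Char × Bool :=
  if c = '"' then (st.1, st.2.1 ++ [c], !st.2.2)
  else if (c = ',' ∨ c = ';') ∧ st.2.2 = false then
    (st.1 ++ [PySem.Chars.strip st.2.1], [], st.2.2)
  else (st.1, st.2.1 ++ [c], st.2.2)

def split_recipients_py (value : String) : List String :=
  if value.toList = [] then []  -- `if not value: return []`
  else
    let st := value.toList.foldl pvStepA ([], [], false)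
    let parts := if st.2.1 ≠ [] then st.1 ++ [PySem.Chars.strip st.2.1] else st.1
    (parts.filter (fun p => p ≠ [])).map String.ofList

-- ===== PORT B =====
-- inner loop of B: `parts.append(current.strip()); current = p`
def pvInner (st : List (List Char) × List Char) (p : List Char) :
    List (List Char) × List Char :=
  (st.1 ++ [PySem.Chars.strip st.2], p)

-- body of B's `for i, seg in enumerate(value.split('"'))` loop
def pvStepB (st : List (List Char) × List Char) (iseg : Int × List Char) :
    List (List Char) × List Char :=
  let cur := if iseg.1 > 0 then st.2 ++ ['"'] else st.2
  if PySem.Int.mod iseg.1 2 = 1 then (st.1, cur ++ iseg.2)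
  else
    let pieces := PySem.Chars.splitOn (PySem.Chars.replace iseg.2 [';'] [',']) [',']
    pieces.tail.foldl pvInner (st.1, cur ++ pieces.headI)

def split_recipients_py_alt (value : String) : List String :=
  let segs := PySem.Chars.splitOn value.toList ['"']
  let st := (PySem.List.enumerate segs 0).foldl pvStepB ([], [])
  let parts := if st.2 ≠ [] then st.1 ++ [PySem.Chars.strip st.2] else st.1
  (parts.filter (fun p => p ≠ [])).map String.ofList

-- ===== PRECONDITION & SPEC =====
def Spec_split_recipients_py (value : String) (out : List String) : Prop := out = split_recipients_py_alt value
instance (value : String) (out : List String) : Decidable (Spec_split_recipients_py value out) := by unfold Spec_split_recipients_py; infer_instance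

-- ===== CLAIM (what is proved, stated in full; the proofs are below) =====
def Claim_equal_split_recipients_py : Prop := ∀ (value : String), Dom_split_recipients_py value → Spec_split_recipients_py value (split_recipients_py value)

-- ===== LEMMAS AND PROOFS =====

-- the ';' → ',' map performed by `seg.replace(";", ",")`
def pvF (c : Char) : Char := if c = ';' then ',' else c

-- PySem.Chars.splitOn with a one-character separator is Mathlib's List.splitOn
theorem pvSplitOn_go_single (c : Char) :
    ∀ (fuel : Nat) (l cur : List Char) (acc : List (List Char)), l.length ≤ fuel →
      PySem.Chars.splitOn.go [c] fuel l cur acc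
        = acc.reverse ++ (l.splitOn c).modifyHead (cur.reverse ++ ·) := by
  intro fuel
  induction fuel with
  | zero =>
    intro l cur acc h
    have hl : l = [] := by
      cases l with
      | nil => rfl
      | cons x xs => simp at h
    subst hl
    simp [PySem.Chars.splitOn.go, List.splitOn]
  | succ fuel ih =>
    intro l cur acc h
    cases l with
    | nil => simp [PySem.Chars.splitOn.go, List.splitOn]
    | cons x xs =>
      by_cases hx : c = x
      · subst hx
        have hpre : List.isPrefixOf [c] (c :: xs) = true := by
          simp [List.isPrefixOf]
        rw [PySem.Chars.splitOn.go, if_pos hpre]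
        simp only [List.length_cons] at h
        rw [ih _ _ _ (by simp; omega)]
        simp [List.splitOn, List.splitOnP_cons]
        rw [show (fun x : List Char => x) = id from rfl, List.modifyHead_id]
        rfl
      · have hpre : List.isPrefixOf [c] (x :: xs) = false := by
          simp [List.isPrefixOf]
          exact hx
        rw [PySem.Chars.splitOn.go, if_neg (by simp [hpre])]
        simp only [List.length_cons] at h
        rw [ih _ _ _ (by omega)]
        simp only [List.splitOn, List.splitOnP_cons, beq_iff_eq]
        rw [if_neg (fun hxc => hx hxc.symm), List.modifyHead_modifyHead]
        have hfg : (fun t : List Char => (x :: cur).reverse ++ t)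
            = ((fun t : List Char => cur.reverse ++ t) ∘ List.cons x) := by
          funext t; simp
        rw [hfg]
theorem pvSplitOn_single (s : List Char) (c : Char) :
    PySem.Chars.splitOn s [c] = s.splitOn c := by
  rw [PySem.Chars.splitOn, pvSplitOn_go_single c _ _ _ _ (by omega)]
  simp
  rw [show (fun x : List Char => x) = id from rfl, List.modifyHead_id]
  rfl

-- PySem.Chars.replace with one-character old/new is a map
theorem pvReplace_go_single (a b : Char) :
    ∀ (fuel : Nat) (l acc : List Char), l.length ≤ fuel →
      PySem.Chars.replace.go [a] [b] fuel l acc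
        = acc.reverse ++ l.map (fun c => if c = a then b else c) := by
  intro fuel
  induction fuel with
  | zero =>
    intro l acc h
    have hl : l = [] := by
      cases l with
      | nil => rfl
      | cons x xs => simp at h
    subst hl
    simp [PySem.Chars.replace.go]
  | succ fuel ih =>
    intro l acc h
    cases l with
    | nil => simp [PySem.Chars.replace.go]
    | cons x xs =>
      simp only [List.length_cons] at h
      by_cases hx : x = a
      · subst hx
        have hpre : List.isPrefixOf [x] (x :: xs) = true := by simp [List.isPrefixOf]
        rw [PySem.Chars.replace.go, if_pos hpre]
        rw [ih _ _ (by simp; omega)]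
        simp
      · have hpre : List.isPrefixOf [a] (x :: xs) = false := by
          simp [List.isPrefixOf]
          exact fun hxc => hx hxc.symm
        rw [PySem.Chars.replace.go, if_neg (by simp [hpre])]
        rw [ih _ _ (by omega)]
        simp [hx]

theorem pvReplace_single (s : List Char) (a b : Char) :
    PySem.Chars.replace s [a] [b] = s.map (fun c => if c = a then b else c) := by
  rw [PySem.Chars.replace]
  simp only [List.isEmpty_cons]
  rw [pvReplace_go_single a b _ _ _ (by omega)]
  simp

-- pieces produced by splitOn do not contain the separator
theorem pvSplitOn_no_sep (c : Char) :
    ∀ (l : List Char), ∀ seg ∈ l.splitOn c, c ∉ seg := by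
  intro l
  induction l with
  | nil => intro seg hseg; simp [List.splitOn] at hseg; simp [hseg]
  | cons x xs ih =>
    intro seg hseg
    by_cases hx : x = c
    · subst hx
      simp [List.splitOn, List.splitOnP_cons] at hseg
      rcases hseg with h | h
      · simp [h]
      · exact ih seg h
    · simp only [List.splitOn, List.splitOnP_cons, beq_iff_eq, hx, ite_false] at hseg
      obtain ⟨h0, t0, ht⟩ := List.exists_cons_of_ne_nil (List.splitOnP_ne_nil (· == c) xs)
      rw [ht] at hseg
      simp only [List.modifyHead_cons, List.mem_cons] at hseg
      rcases hseg with h | h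
      · subst h
        have hh : c ∉ h0 := ih h0 (by simp [List.splitOn, ht])
        simp [hh]
        exact fun hcx => (hx hcx.symm).elim
      · exact ih seg (by simp [List.splitOn, ht, h])

theorem pvIntercalate_cons (q : Char) :
    ∀ (xs : List (List Char)) (x : List Char),
      List.intercalate [q] (x :: xs) = x ++ xs.flatMap (fun s => q :: s) := by
  intro xs
  induction xs with
  | nil => intro x; simp [List.intercalate]
  | cons y ys ih =>
    intro x
    rw [List.intercalate, List.intersperse_cons₂, List.flatten_cons, List.flatten_cons]
    rw [show (List.intersperse [q] (y :: ys)).flatten = List.intercalate [q] (y :: ys) from rfl]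
    rw [ih]
    simp

-- A inside quotes over a quote-free segment: everything is appended to current
theorem pvL1 : ∀ (cs : List Char) (parts : List (List Char)) (current : List Char),
    '"' ∉ cs →
    cs.foldl pvStepA (parts, current, true) = (parts, current ++ cs, true) := by
  intro cs
  induction cs with
  | nil => intro parts current _; simp
  | cons c cs ih =>
    intro parts current h
    simp only [List.mem_cons, not_or] at h
    have hc : ¬ c = '"' := fun hc => h.1 hc.symm
    simp only [List.foldl_cons, pvStepA, if_neg hc]
    rw [if_neg (by simp)]
    rw [ih _ _ h.2]
    simp

-- A outside quotes over a quote-free segment = B's even-segment processing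
theorem pvL2 : ∀ (cs : List Char) (parts : List (List Char)) (current : List Char),
    '"' ∉ cs →
    cs.foldl pvStepA (parts, current, false)
      = (let P := (cs.map pvF).splitOn ','
         let q := P.tail.foldl pvInner (parts, current ++ P.headI)
         (q.1, q.2, false)) := by
  intro cs
  induction cs with
  | nil => intro parts current _; simp [List.splitOn]
  | cons c cs ih =>
    intro parts current h
    simp only [List.mem_cons, not_or] at h
    have hc : ¬ c = '"' := fun hc => h.1 hc.symm
    obtain ⟨h0, t0, ht⟩ := List.exists_cons_of_ne_nil
      (List.splitOnP_ne_nil (· == ',') (cs.map pvF))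
    by_cases hd : c = ',' ∨ c = ';'
    · have hF : pvF c = ',' := by rcases hd with h | h <;> simp [pvF, h]
      simp only [List.foldl_cons, pvStepA, if_neg hc]
      rw [if_pos (⟨hd, trivial⟩ : (c = ',' ∨ c = ';') ∧ True)]
      rw [ih _ _ h.2]
      simp only [List.map_cons, hF, List.splitOn, List.splitOnP_cons, beq_self_eq_true,
        if_true, List.tail_cons, List.headI_cons]
      rw [show ((List.splitOnP (· == ',') (cs.map pvF))) = h0 :: t0 from ht]
      simp [pvInner]
    · have hF : pvF c = c := by
        simp only [pvF, ite_eq_right_iff]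
        intro hcs; exact absurd (Or.inr hcs) hd
      have hcc : ¬ (c == ',') = true := by
        simp only [beq_iff_eq]
        intro hcs; exact hd (Or.inl hcs)
      simp only [List.foldl_cons, pvStepA, if_neg hc]
      rw [if_neg (show ¬((c = ',' ∨ c = ';') ∧ True) from fun hh => hd hh.1)]
      rw [ih _ _ h.2]
      simp only [List.map_cons, hF, List.splitOn, List.splitOnP_cons, hcc]
      rw [ht]
      simp

-- B's fold over the segments after the first = A's fold over the quoted remainder
theorem pvAux : ∀ (segs : List (List Char)) (n : Nat) (parts : List (List Char))
    (current : List Char), 1 ≤ n → (∀ seg ∈ segs, '"' ∉ seg) →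
    (PySem.List.enumerate segs (n : Int)).foldl pvStepB (parts, current)
      = (let r := (segs.flatMap (fun seg => '"' :: seg)).foldl pvStepA
                    (parts, current, decide ((n - 1) % 2 = 1))
         (r.1, r.2.1)) := by
  intro segs
  induction segs with
  | nil => intro n parts current _ _; simp [PySem.List.enumerate]
  | cons seg rest ih =>
    intro n parts current hn hq
    have hqseg : '"' ∉ seg := hq seg (by simp)
    have hqrest : ∀ s ∈ rest, '"' ∉ s := fun s hs => hq s (by simp [hs])
    rw [PySem.List.enumerate_cons, List.foldl_cons]
    have hpos : ((n : Int) > 0) := by exact_mod_cast hn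
    have hmod : PySem.Int.mod (n : Int) 2 = ((n % 2 : Nat) : Int) := by
      exact_mod_cast PySem.Int.mod_natCast n 2
    simp only [List.flatMap_cons, List.foldl_append, List.foldl_cons]
    have hstep1 : pvStepA (parts, current, decide ((n - 1) % 2 = 1)) '"'
        = (parts, current ++ ['"'], !decide ((n - 1) % 2 = 1)) := by
      simp [pvStepA]
    rw [hstep1]
    by_cases hodd : n % 2 = 1
    · have h1 : ¬ (n - 1) % 2 = 1 := by omega
      have h2 : (!decide ((n - 1) % 2 = 1)) = true := by simp [h1]
      have hB : pvStepB (parts, current) ((n : Int), seg)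
          = (parts, (current ++ ['"']) ++ seg) := by
        simp only [pvStepB, hpos, if_pos]
        rw [if_pos (by rw [hmod, hodd]; norm_num)]
      rw [hB, h2, pvL1 seg parts (current ++ ['"']) hqseg]
      have : ((n : Int) + 1) = ((n + 1 : Nat) : Int) := by push_cast; ring
      rw [this, ih (n + 1) _ _ (by omega) hqrest]
      have h3 : decide ((n + 1 - 1) % 2 = 1) = true := by simp [hodd]
      rw [h3]
    · have h1 : (n - 1) % 2 = 1 := by omega
      have h2 : (!decide ((n - 1) % 2 = 1)) = false := by simp [h1]
      have hmne : ¬ PySem.Int.mod (n : Int) 2 = 1 := by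
        rw [hmod]; exact_mod_cast hodd
      have hB : pvStepB (parts, current) ((n : Int), seg)
          = (let P := PySem.Chars.splitOn (PySem.Chars.replace seg [';'] [',']) [',']
             P.tail.foldl pvInner (parts, (current ++ ['"']) ++ P.headI)) := by
        simp only [pvStepB, hpos, if_pos, if_neg hmne]
      rw [hB, h2, pvL2 seg parts (current ++ ['"']) hqseg]
      simp only [pvReplace_single, pvSplitOn_single]
      rw [show (fun c => if c = ';' then ',' else c) = pvF from rfl]
      have : ((n : Int) + 1) = ((n + 1 : Nat) : Int) := by push_cast; ring
      rw [this, ih (n + 1) _ _ (by omega) hqrest]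
      have h3 : decide ((n + 1 - 1) % 2 = 1) = false := by simp [hodd]
      rw [h3]

-- ===== VERDICT (by name: the statement is the Claim_ definition above) =====
theorem split_recipients_py_spec : Claim_equal_split_recipients_py := by
  intro value _
  unfold Spec_split_recipients_py
  by_cases h : value.toList = []
  · rw [split_recipients_py, if_pos h, split_recipients_py_alt]
    simp only [h]
    decide
  · have hne : value.toList.splitOn '"' ≠ [] := List.splitOnP_ne_nil _ _
    obtain ⟨s0, rest, hsegs⟩ := List.exists_cons_of_ne_nil hne
    have hnosep := pvSplitOn_no_sep '"' value.toList
    have hq0 : '"' ∉ s0 := hnosep s0 (by rw [hsegs]; exact List.mem_cons_self ..)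
    have hqrest : ∀ s ∈ rest, '"' ∉ s := fun s hs =>
      hnosep s (by rw [hsegs]; exact List.mem_cons_of_mem _ hs)
    have hl := (List.intercalate_splitOn (x := '"') (xs := value.toList)).symm
    rw [hsegs, pvIntercalate_cons] at hl
    -- state after segment 0 (both sides)
    set P0 := (s0.map pvF).splitOn ',' with hP0
    set q0 := P0.tail.foldl pvInner ([], [] ++ P0.headI) with hq0def
    set r := (rest.flatMap (fun s => '"' :: s)).foldl pvStepA (q0.1, q0.2, false) with hr
    have hA : List.foldl pvStepA ([], [], false) value.toList = r := by
      rw [hl, List.foldl_append, pvL2 s0 [] [] hq0]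
    have hB0 : pvStepB ([], []) ((0 : Int), s0) = (q0.1, q0.2) := by
      rw [pvStepB]
      simp only [pvReplace_single, pvSplitOn_single]
      rw [if_neg (show ¬((0 : Int) > 0) by decide),
        if_neg (show ¬(PySem.Int.mod (0 : Int) 2 = 1) by decide)]
      rw [show (fun c => if c = ';' then ',' else c) = pvF from rfl]
    have hB : List.foldl pvStepB ([], [])
        (PySem.List.enumerate (value.toList.splitOn '"') 0) = (r.1, r.2.1) := by
      rw [hsegs, PySem.List.enumerate_cons, List.foldl_cons, hB0]
      rw [show ((0 : Int) + 1) = ((1 : Nat) : Int) by norm_num]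
      rw [pvAux rest 1 q0.1 q0.2 (le_refl 1) hqrest]
      rw [show (decide ((1 - 1) % 2 = 1)) = false by decide]
    rw [split_recipients_py, if_neg h, split_recipients_py_alt]
    simp only [pvSplitOn_single, hA, hB]
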